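-- pv_equiv track=rewrite | github.com/tomerfri12/gtm-db | scripts/import_funnel.py | _build_campaign_rows
-- ===== SOURCE A (Python) =====
-- from typing import Any
--
-- def _normalize_landing_url(raw: str | None) -> str:
--     if not raw:
--         return ""
--     s = raw.strip()
--     if not s:
--         return ""
--     if s.startswith("http://") or s.startswith("https://"):
--         return s
--     return "https://" + s.lstrip("/")
--
-- def _s(v: str | None) -> str | None:
--     if v is None:
--         return None
--     t = v.strip()
--     return t if t else None
--
-- def _build_campaign_rows(
--     monday: list[dict[str, str | None]], q1: list[dict[str, str]]
-- ) -> list[dict[str, Any]]: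
--     """One row per distinct campaign name (full execution string)."""
--     by_name: dict[str, dict[str, Any]] = {}
--     for r in monday:
--         name = _s(r.get("marketing_campaign"))
--         if not name:
--             continue
--         entry = by_name.setdefault(
--             name,
--             {
--                 "name": name,
--                 "campaign_category": None,
--                 "channel_name": None,
--                 "landing_url": None,
--                 "marketing_source": None,
--             },
--         )
--         entry["campaign_category"] = entry["campaign_category"] or _s(
--             r.get("campaign_category")
--         )
--         entry["channel_name"] = entry["channel_name"] or _s(r.get("grouped_channel"))
--         lu = _normalize_landing_url(r.get("marketing_landing_page") or "")
--         if lu: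
--             entry["landing_url"] = entry["landing_url"] or lu
--         entry["marketing_source"] = entry["marketing_source"] or _s(
--             r.get("marketing_source")
--         )
--     for r in q1:
--         name = _s(r.get("CAMPAIGN"))
--         if not name:
--             continue
--         entry = by_name.setdefault(
--             name,
--             {
--                 "name": name,
--                 "campaign_category": None,
--                 "channel_name": None,
--                 "landing_url": None,
--                 "marketing_source": None,
--             },
--         )
--         entry["campaign_category"] = entry["campaign_category"] or _s(
--             r.get("CAMPAIGN_CATEGORY")
--         )
--         entry["channel_name"] = entry["channel_name"] or _s(r.get("GROUPED_CHANNEL"))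
--         lu = _normalize_landing_url(r.get("LANDING_PAGE") or "")
--         if lu:
--             entry["landing_url"] = entry["landing_url"] or lu
--     return list(by_name.values())
-- ===== SOURCE B (Python) =====
-- from typing import Any
--
-- def _normalize_landing_url(raw: str | None) -> str:
--     if not raw:
--         return ""
--     s = raw.strip()
--     if not s:
--         return ""
--     if s.startswith("http://") or s.startswith("https://"):
--         return s
--     return "https://" + s.lstrip("/")
--
-- def _s(v: str | None) -> str | None:
--     if v is None:
--         return None
--     t = v.strip()
--     return t if t else None
--
-- def _first_truthy(rows, f):
--     for src, r in rows:
--         v = f(src, r)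
--         if v:
--             return v
--     return None
--
-- def _build_campaign_rows(
--     monday: list[dict[str, str | None]], q1: list[dict[str, str]]
-- ) -> list[dict[str, Any]]:
--     """One row per distinct campaign name (full execution string)."""
--     # pass 1: group rows by campaign name, tagged with their source
--     groups: dict[str, list] = {}
--     for src, rows, name_key in (("m", monday, "marketing_campaign"), ("q", q1, "CAMPAIGN")):
--         for r in rows:
--             name = _s(r.get(name_key))
--             if name:
--                 groups.setdefault(name, []).append((src, r))
--     # pass 2: per field, first truthy normalized value in encounter order
--     out = []
--     for name, rows in groups.items():
--         out.append({
--             "name": name,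
--             "campaign_category": _first_truthy(
--                 rows, lambda s, r: _s(r.get("campaign_category" if s == "m" else "CAMPAIGN_CATEGORY"))),
--             "channel_name": _first_truthy(
--                 rows, lambda s, r: _s(r.get("grouped_channel" if s == "m" else "GROUPED_CHANNEL"))),
--             "landing_url": _first_truthy(
--                 rows, lambda s, r: _normalize_landing_url(
--                     r.get("marketing_landing_page" if s == "m" else "LANDING_PAGE") or "") or None),
--             "marketing_source": _first_truthy(
--                 rows, lambda s, r: _s(r.get("marketing_source")) if s == "m" else None),
--         })
--     return out
-- ===== Notes on version B (the rewrite author's own statement) =====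
-- stated objective: alternative
-- what changed: A folds rows into partially-built entry dicts it mutates in place per row; B first groups the source-tagged rows by campaign name into an ordered dict, then builds each entry in a second pass by taking, per field, the first truthy normalized value over the group's rows.
import Mathlib
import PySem

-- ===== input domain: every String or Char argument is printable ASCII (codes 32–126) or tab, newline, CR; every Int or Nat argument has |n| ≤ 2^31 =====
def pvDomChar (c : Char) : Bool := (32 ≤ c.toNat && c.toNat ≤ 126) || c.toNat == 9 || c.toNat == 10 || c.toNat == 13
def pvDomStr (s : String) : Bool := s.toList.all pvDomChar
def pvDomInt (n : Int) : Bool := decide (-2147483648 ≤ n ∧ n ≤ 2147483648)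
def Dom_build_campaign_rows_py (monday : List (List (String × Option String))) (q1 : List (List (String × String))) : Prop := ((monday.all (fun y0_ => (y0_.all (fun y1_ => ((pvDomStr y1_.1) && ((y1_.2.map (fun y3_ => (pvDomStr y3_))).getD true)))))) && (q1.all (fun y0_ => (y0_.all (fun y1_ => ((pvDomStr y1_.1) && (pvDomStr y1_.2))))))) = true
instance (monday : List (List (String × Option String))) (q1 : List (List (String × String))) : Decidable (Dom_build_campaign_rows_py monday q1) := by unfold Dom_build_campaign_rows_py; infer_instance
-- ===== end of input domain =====

-- B replaces A's in-place fold over partially built entry dicts by a two-pass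
-- group-then-aggregate decomposition (same cost); return values proved equal on Dom.

-- ===== PORT A =====
-- r.get(k) on a monday row (dict[str, str|None]): first match; a missing key and a
-- stored None both read as None
def pvGetM (r : List (String × Option String)) (k : String) : Option String :=
  match r.find? (fun p => p.1 == k) with
  | some p => p.2
  | none => none

-- r.get(k) on a q1 row (dict[str, str])
def pvGetQ (r : List (String × String)) (k : String) : Option String :=
  (r.find? (fun p => p.1 == k)).map (fun p => p.2)

-- _s (module helper shared by A and B)
def pyS (v : Option String) : Option String :=
  match v with
  | none => none
  | some s =>
    let t := PySem.Str.strip s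
    if t = "" then none else some t

-- _normalize_landing_url (module helper shared by A and B); s.lstrip("/") is ported by
-- hand as dropWhile (· == '/') on the character list — exact: it drops exactly the
-- leading '/' characters
def pyNormUrl (raw : String) : String :=
  if raw = "" then ""
  else
    let s := PySem.Str.strip raw
    if s = "" then ""
    else if PySem.Str.startswith s "http://" || PySem.Str.startswith s "https://" then s
    else "https://" ++ String.ofList (s.toList.dropWhile (fun c => c == '/'))

-- Python 'x or y' on entry-field values (falsy = None or "")
def pyOr (a b : Option String) : Option String :=
  match a with
  | some v => if v = "" then b else some v
  | none => b

-- the dict literal A passes to setdefault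
def pvInitEntry (name : String) : PySem.Dict String (Option String) :=
  PySem.Dict.mk [("name", some name), ("campaign_category", none), ("channel_name", none),
                 ("landing_url", none), ("marketing_source", none)]

-- the entry-field updates of A's monday loop body
def pvUpdM (entry : PySem.Dict String (Option String)) (r : List (String × Option String)) :
    PySem.Dict String (Option String) :=
  let entry := entry.insert "campaign_category"
    (pyOr (entry.getD "campaign_category" none) (pyS (pvGetM r "campaign_category")))
  let entry := entry.insert "channel_name"
    (pyOr (entry.getD "channel_name" none) (pyS (pvGetM r "grouped_channel")))
  let lu := pyNormUrl ((pvGetM r "marketing_landing_page").getD "")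
  let entry := if lu ≠ "" then
      entry.insert "landing_url" (pyOr (entry.getD "landing_url" none) (some lu))
    else entry
  entry.insert "marketing_source"
    (pyOr (entry.getD "marketing_source" none) (pyS (pvGetM r "marketing_source")))

-- body of A's first loop (over monday); the entry keys are always present, so the getD
-- default is never used (Python's entry[k] would raise only on a missing key)
def pvAStepM (d : PySem.Dict String (PySem.Dict String (Option String)))
    (r : List (String × Option String)) : PySem.Dict String (PySem.Dict String (Option String)) :=
  match pyS (pvGetM r "marketing_campaign") with
  | none => d
  | some name =>
    let d := d.setdefault name (pvInitEntry name)
    let entry := (d.get? name).getD (pvInitEntry name)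
    d.insert name (pvUpdM entry r)

-- the entry-field updates of A's q1 loop body (no marketing_source update)
def pvUpdQ (entry : PySem.Dict String (Option String)) (r : List (String × String)) :
    PySem.Dict String (Option String) :=
  let entry := entry.insert "campaign_category"
    (pyOr (entry.getD "campaign_category" none) (pyS (pvGetQ r "CAMPAIGN_CATEGORY")))
  let entry := entry.insert "channel_name"
    (pyOr (entry.getD "channel_name" none) (pyS (pvGetQ r "GROUPED_CHANNEL")))
  let lu := pyNormUrl ((pvGetQ r "LANDING_PAGE").getD "")
  if lu ≠ "" then
    entry.insert "landing_url" (pyOr (entry.getD "landing_url" none) (some lu))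
  else entry

-- body of A's second loop (over q1)
def pvAStepQ (d : PySem.Dict String (PySem.Dict String (Option String)))
    (r : List (String × String)) : PySem.Dict String (PySem.Dict String (Option String)) :=
  match pyS (pvGetQ r "CAMPAIGN") with
  | none => d
  | some name =>
    let d := d.setdefault name (pvInitEntry name)
    let entry := (d.get? name).getD (pvInitEntry name)
    d.insert name (pvUpdQ entry r)

def build_campaign_rows_py (monday : List (List (String × Option String))) (q1 : List (List (String × String))) : List (List (String × Option String)) :=
  let byName := monday.foldl pvAStepM PySem.Dict.empty
  let byName := q1.foldl pvAStepQ byName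
  byName.values.map (fun e => e.items)

-- ===== PORT B =====
-- B: campaign name of a source-tagged row (inl = a monday row, inr = a q1 row)
def pvNameOf : Sum (List (String × Option String)) (List (String × String)) → Option String
  | .inl r => pyS (pvGetM r "marketing_campaign")
  | .inr r => pyS (pvGetQ r "CAMPAIGN")

-- B: groups.setdefault(name, []).append((src, r)) for one row
def pvAddToGroups
    (g : PySem.Dict String (List (Sum (List (String × Option String)) (List (String × String)))))
    (x : Sum (List (String × Option String)) (List (String × String))) :
    PySem.Dict String (List (Sum (List (String × Option String)) (List (String × String)))) :=
  match pvNameOf x with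
  | none => g
  | some name => g.modify name [] (fun l => l ++ [x])

-- B: _first_truthy (skips falsy values, i.e. None and "")
def pvFirstTruthy (rows : List (Sum (List (String × Option String)) (List (String × String))))
    (f : Sum (List (String × Option String)) (List (String × String)) → Option String) : Option String :=
  match rows with
  | [] => none
  | x :: t =>
    match f x with
    | some v => if v = "" then pvFirstTruthy t f else some v
    | none => pvFirstTruthy t f

-- B's per-field lambdas, dispatching on the row's source tag
def pvCatOf : Sum (List (String × Option String)) (List (String × String)) → Option String
  | .inl r => pyS (pvGetM r "campaign_category")
  | .inr r => pyS (pvGetQ r "CAMPAIGN_CATEGORY")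

def pvChanOf : Sum (List (String × Option String)) (List (String × String)) → Option String
  | .inl r => pyS (pvGetM r "grouped_channel")
  | .inr r => pyS (pvGetQ r "GROUPED_CHANNEL")

def pvLuOf : Sum (List (String × Option String)) (List (String × String)) → Option String
  | .inl r =>
    let lu := pyNormUrl ((pvGetM r "marketing_landing_page").getD "")
    if lu = "" then none else some lu
  | .inr r =>
    let lu := pyNormUrl ((pvGetQ r "LANDING_PAGE").getD "")
    if lu = "" then none else some lu

def pvSrcOf : Sum (List (String × Option String)) (List (String × String)) → Option String
  | .inl r => pyS (pvGetM r "marketing_source")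
  | .inr _ => none

-- B: the entry dict appended for one group
def pvMkEntry (name : String)
    (rows : List (Sum (List (String × Option String)) (List (String × String)))) :
    List (String × Option String) :=
  [("name", some name),
   ("campaign_category", pvFirstTruthy rows pvCatOf),
   ("channel_name", pvFirstTruthy rows pvChanOf),
   ("landing_url", pvFirstTruthy rows pvLuOf),
   ("marketing_source", pvFirstTruthy rows pvSrcOf)]

def build_campaign_rows_py_alt (monday : List (List (String × Option String))) (q1 : List (List (String × String))) : List (List (String × Option String)) :=
  let g := monday.foldl (fun g r => pvAddToGroups g (Sum.inl r)) PySem.Dict.empty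
  let g := q1.foldl (fun g r => pvAddToGroups g (Sum.inr r)) g
  g.items.map (fun p => pvMkEntry p.1 p.2)


-- ===== PRECONDITION & SPEC =====
def Spec_build_campaign_rows_py (monday : List (List (String × Option String))) (q1 : List (List (String × String))) (out : List (List (String × Option String))) : Prop := out = build_campaign_rows_py_alt monday q1
instance (monday : List (List (String × Option String))) (q1 : List (List (String × String))) (out : List (List (String × Option String))) : Decidable (Spec_build_campaign_rows_py monday q1 out) := by unfold Spec_build_campaign_rows_py; infer_instance

-- ===== CLAIM (what is proved, stated in full; the proofs are below) =====
def Claim_equal_build_campaign_rows_py : Prop := ∀ (monday : List (List (String × Option String))) (q1 : List (List (String × String))), Dom_build_campaign_rows_py monday q1 → Spec_build_campaign_rows_py monday q1 (build_campaign_rows_py monday q1)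

-- ===== LEMMAS AND PROOFS =====
-- one step of A, over a source-tagged row (proof-side view of A's two loop bodies)
def pvStepA (d : PySem.Dict String (PySem.Dict String (Option String)))
    (x : Sum (List (String × Option String)) (List (String × String))) :
    PySem.Dict String (PySem.Dict String (Option String)) :=
  match x with
  | .inl r => pvAStepM d r
  | .inr r => pvAStepQ d r

-- A's by_name dict, expressed from B's groups dict
def pvTransform
    (g : PySem.Dict String (List (Sum (List (String × Option String)) (List (String × String))))) :
    PySem.Dict String (PySem.Dict String (Option String)) :=
  PySem.Dict.mk (g.items.map (fun p => (p.1, PySem.Dict.mk (pvMkEntry p.1 p.2))))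

theorem pyS_ne_empty (v : Option String) : pyS v ≠ some "" := by
  unfold pyS
  cases v with
  | none => simp
  | some s =>
    dsimp only
    split_ifs with h
    · simp
    · simp [h]

theorem pvCatOf_ne_empty (x : Sum (List (String × Option String)) (List (String × String))) :
    pvCatOf x ≠ some "" := by
  cases x <;> exact pyS_ne_empty _

theorem pvChanOf_ne_empty (x : Sum (List (String × Option String)) (List (String × String))) :
    pvChanOf x ≠ some "" := by
  cases x <;> exact pyS_ne_empty _

theorem pvLuOf_ne_empty (x : Sum (List (String × Option String)) (List (String × String))) :
    pvLuOf x ≠ some "" := by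
  cases x with
  | inl r =>
    unfold pvLuOf
    dsimp only
    split_ifs with h
    · simp
    · simp [h]
  | inr r =>
    unfold pvLuOf
    dsimp only
    split_ifs with h
    · simp
    · simp [h]

theorem pvSrcOf_ne_empty (x : Sum (List (String × Option String)) (List (String × String))) :
    pvSrcOf x ≠ some "" := by
  cases x with
  | inl r => exact pyS_ne_empty _
  | inr r => simp [pvSrcOf]

theorem pyOr_none (a : Option String) (h : a ≠ some "") : pyOr a none = a := by
  unfold pyOr
  cases a with
  | none => rfl
  | some v =>
    have : v ≠ "" := fun hv => h (by rw [hv])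
    simp [this]

theorem firstTruthy_ne_empty (rows : List (Sum (List (String × Option String)) (List (String × String))))
    (f : Sum (List (String × Option String)) (List (String × String)) → Option String)
    (hf : ∀ x, f x ≠ some "") : pvFirstTruthy rows f ≠ some "" := by
  induction rows with
  | nil => simp [pvFirstTruthy]
  | cons x t ih =>
    unfold pvFirstTruthy
    cases h : f x with
    | none => exact ih
    | some v =>
      have hv : v ≠ "" := fun hv => hf x (by rw [h, hv])
      simp [hv]

theorem firstTruthy_append (rows : List (Sum (List (String × Option String)) (List (String × String))))
    (r : Sum (List (String × Option String)) (List (String × String)))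
    (f : Sum (List (String × Option String)) (List (String × String)) → Option String)
    (hf : ∀ x, f x ≠ some "") :
    pvFirstTruthy (rows ++ [r]) f = pyOr (pvFirstTruthy rows f) (f r) := by
  induction rows with
  | nil =>
    simp only [List.nil_append]
    unfold pvFirstTruthy pyOr
    cases h : f r with
    | none => rfl
    | some v =>
      have hv : v ≠ "" := fun hv => hf r (by rw [h, hv])
      simp [hv]
  | cons x t ih =>
    simp only [List.cons_append]
    unfold pvFirstTruthy
    cases h : f x with
    | none => exact ih
    | some v =>
      have hv : v ≠ "" := fun hv => hf x (by rw [h, hv])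
      simp [hv, pyOr]

theorem contains_transform (g : PySem.Dict String (List (Sum (List (String × Option String)) (List (String × String))))) (k : String) :
    (pvTransform g).contains k = g.contains k := by
  simp only [pvTransform, PySem.Dict.contains, List.any_map]
  rfl

theorem get?_transform (g : PySem.Dict String (List (Sum (List (String × Option String)) (List (String × String))))) (k : String) :
    (pvTransform g).get? k = (g.get? k).map (fun v => PySem.Dict.mk (pvMkEntry k v)) := by
  unfold pvTransform PySem.Dict.get?
  rw [List.find?_map]
  cases h : List.find? (fun p => p.1 == k) g.items with
  | none =>
    have h2 : List.find? ((fun p => p.1 == k) ∘ (fun p => (p.1, PySem.Dict.mk (pvMkEntry p.1 p.2)))) g.items = none := by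
      simpa [Function.comp] using h
    simp [h2]
  | some p =>
    have hp : p.1 = k := by
      have := List.find?_some h
      simpa using this
    have h2 : List.find? ((fun p => p.1 == k) ∘ (fun p => (p.1, PySem.Dict.mk (pvMkEntry p.1 p.2)))) g.items = some p := by
      simpa [Function.comp] using h
    simp [h2, hp]

theorem insert_transform (g : PySem.Dict String (List (Sum (List (String × Option String)) (List (String × String))))) (k : String) (w : List (Sum (List (String × Option String)) (List (String × String)))) :
    (pvTransform g).insert k (PySem.Dict.mk (pvMkEntry k w)) = pvTransform (g.insert k w) := by
  unfold PySem.Dict.insert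
  rw [contains_transform]
  by_cases h : g.contains k
  · simp only [h, if_pos]
    unfold pvTransform
    simp only [List.map_map]
    congr 1
    apply List.map_congr_left
    intro p _
    by_cases hp : p.1 = k
    · simp [Function.comp, hp]
    · simp [Function.comp, hp]
  · simp only [h, if_neg, Bool.false_eq_true, not_false_iff]
    unfold pvTransform
    simp [List.map_append]


theorem updM_entry (n : String) (rs : List (Sum (List (String × Option String)) (List (String × String)))) (r : List (String × Option String)) :
    pvUpdM (PySem.Dict.mk (pvMkEntry n rs)) r = PySem.Dict.mk (pvMkEntry n (rs ++ [Sum.inl r])) := by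
  have hca := firstTruthy_append rs (Sum.inl r) pvCatOf pvCatOf_ne_empty
  have hch := firstTruthy_append rs (Sum.inl r) pvChanOf pvChanOf_ne_empty
  have hlu := firstTruthy_append rs (Sum.inl r) pvLuOf pvLuOf_ne_empty
  have hsr := firstTruthy_append rs (Sum.inl r) pvSrcOf pvSrcOf_ne_empty
  have hne := firstTruthy_ne_empty rs pvLuOf pvLuOf_ne_empty
  unfold pvUpdM pvMkEntry
  by_cases h : pyNormUrl ((pvGetM r "marketing_landing_page").getD "") = ""
  · simp [h, PySem.Dict.insert, PySem.Dict.contains, PySem.Dict.getD, PySem.Dict.get?,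
      hca, hch, hlu, hsr, pvCatOf, pvChanOf, pvLuOf, pvSrcOf, pyOr_none _ hne]
  · simp [h, PySem.Dict.insert, PySem.Dict.contains, PySem.Dict.getD, PySem.Dict.get?,
      hca, hch, hlu, hsr, pvCatOf, pvChanOf, pvLuOf, pvSrcOf]

theorem updQ_entry (n : String) (rs : List (Sum (List (String × Option String)) (List (String × String)))) (r : List (String × String)) :
    pvUpdQ (PySem.Dict.mk (pvMkEntry n rs)) r = PySem.Dict.mk (pvMkEntry n (rs ++ [Sum.inr r])) := by
  have hca := firstTruthy_append rs (Sum.inr r) pvCatOf pvCatOf_ne_empty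
  have hch := firstTruthy_append rs (Sum.inr r) pvChanOf pvChanOf_ne_empty
  have hlu := firstTruthy_append rs (Sum.inr r) pvLuOf pvLuOf_ne_empty
  have hsr := firstTruthy_append rs (Sum.inr r) pvSrcOf pvSrcOf_ne_empty
  have hne := firstTruthy_ne_empty rs pvLuOf pvLuOf_ne_empty
  have hms := firstTruthy_ne_empty rs pvSrcOf pvSrcOf_ne_empty
  unfold pvUpdQ pvMkEntry
  by_cases h : pyNormUrl ((pvGetQ r "LANDING_PAGE").getD "") = ""
  · simp [h, PySem.Dict.insert, PySem.Dict.contains, PySem.Dict.getD, PySem.Dict.get?,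
      hca, hch, hlu, hsr, pvCatOf, pvChanOf, pvLuOf, pvSrcOf, pyOr_none _ hne, pyOr_none _ hms]
  · simp [h, PySem.Dict.insert, PySem.Dict.contains, PySem.Dict.getD, PySem.Dict.get?,
      hca, hch, hlu, hsr, pvCatOf, pvChanOf, pvLuOf, pvSrcOf, pyOr_none _ hms]

theorem stepA_transform (g : PySem.Dict String (List (Sum (List (String × Option String)) (List (String × String))))) (x : Sum (List (String × Option String)) (List (String × String))) :
    pvStepA (pvTransform g) x = pvTransform (pvAddToGroups g x) := by
  cases x with
  | inl r =>
    show pvAStepM (pvTransform g) r = pvTransform (pvAddToGroups g (Sum.inl r))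
    unfold pvAStepM pvAddToGroups
    simp only [pvNameOf]
    cases hn : pyS (pvGetM r "marketing_campaign") with
    | none => rfl
    | some n =>
      unfold PySem.Dict.modify
      by_cases hc : g.contains n = true
      · have hsd : (pvTransform g).setdefault n (pvInitEntry n) = pvTransform g :=
          by apply PySem.Dict.setdefault_of_contains; rw [contains_transform]; exact hc
        obtain ⟨v, hv⟩ : ∃ v, g.get? n = some v := by
          rw [PySem.Dict.contains_eq_isSome_get?] at hc
          exact Option.isSome_iff_exists.mp hc
        have hgd : g.getD n [] = v := by rw [PySem.Dict.getD_eq_get?_getD, hv]; rfl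
        have hget : (pvTransform g).get? n = some (PySem.Dict.mk (pvMkEntry n v)) := by
          rw [get?_transform, hv]; rfl
        simp only [hsd, hget, Option.getD_some, hgd, updM_entry, insert_transform]
      · have hcf : g.contains n = false := by simpa using hc
        have h1 : (pvTransform g).setdefault n (pvInitEntry n) = (pvTransform g).insert n (pvInitEntry n) :=
          by apply PySem.Dict.setdefault_of_not_contains; rw [contains_transform]; exact hcf
        have h2 : ((pvTransform g).insert n (pvInitEntry n)).get? n = some (pvInitEntry n) :=
          PySem.Dict.get?_insert_self _ _ _
        have h3 : pvInitEntry n = PySem.Dict.mk (pvMkEntry n []) := rfl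
        have hgd : g.getD n [] = [] := by apply PySem.Dict.getD_of_not_contains; exact hcf
        simp only [h1, h2, Option.getD_some, hgd, List.nil_append]
        rw [h3, updM_entry, PySem.Dict.insert_insert_self, insert_transform]
        simp
  | inr r =>
    show pvAStepQ (pvTransform g) r = pvTransform (pvAddToGroups g (Sum.inr r))
    unfold pvAStepQ pvAddToGroups
    simp only [pvNameOf]
    cases hn : pyS (pvGetQ r "CAMPAIGN") with
    | none => rfl
    | some n =>
      unfold PySem.Dict.modify
      by_cases hc : g.contains n = true
      · have hsd : (pvTransform g).setdefault n (pvInitEntry n) = pvTransform g :=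
          by apply PySem.Dict.setdefault_of_contains; rw [contains_transform]; exact hc
        obtain ⟨v, hv⟩ : ∃ v, g.get? n = some v := by
          rw [PySem.Dict.contains_eq_isSome_get?] at hc
          exact Option.isSome_iff_exists.mp hc
        have hgd : g.getD n [] = v := by rw [PySem.Dict.getD_eq_get?_getD, hv]; rfl
        have hget : (pvTransform g).get? n = some (PySem.Dict.mk (pvMkEntry n v)) := by
          rw [get?_transform, hv]; rfl
        simp only [hsd, hget, Option.getD_some, hgd, updQ_entry, insert_transform]
      · have hcf : g.contains n = false := by simpa using hc
        have h1 : (pvTransform g).setdefault n (pvInitEntry n) = (pvTransform g).insert n (pvInitEntry n) :=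
          by apply PySem.Dict.setdefault_of_not_contains; rw [contains_transform]; exact hcf
        have h2 : ((pvTransform g).insert n (pvInitEntry n)).get? n = some (pvInitEntry n) :=
          PySem.Dict.get?_insert_self _ _ _
        have h3 : pvInitEntry n = PySem.Dict.mk (pvMkEntry n []) := rfl
        have hgd : g.getD n [] = [] := by apply PySem.Dict.getD_of_not_contains; exact hcf
        simp only [h1, h2, Option.getD_some, hgd, List.nil_append]
        rw [h3, updQ_entry, PySem.Dict.insert_insert_self, insert_transform]
        simp

theorem foldl_transform (rows : List (Sum (List (String × Option String)) (List (String × String)))) (g : PySem.Dict String (List (Sum (List (String × Option String)) (List (String × String))))) :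
    rows.foldl pvStepA (pvTransform g) = pvTransform (rows.foldl pvAddToGroups g) := by
  induction rows generalizing g with
  | nil => rfl
  | cons x t ih => simp only [List.foldl_cons, stepA_transform, ih]


-- ===== VERDICT (by name: the statement is the Claim_ definition above) =====
theorem build_campaign_rows_py_spec : Claim_equal_build_campaign_rows_py := by
  intro monday q1 _
  unfold Spec_build_campaign_rows_py
  show (q1.foldl pvAStepQ (monday.foldl pvAStepM PySem.Dict.empty)).values.map (fun e => e.items)
      = ((q1.foldl (fun g r => pvAddToGroups g (Sum.inr r)) (monday.foldl (fun g r => pvAddToGroups g (Sum.inl r)) PySem.Dict.empty)).items.map (fun p => pvMkEntry p.1 p.2))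
  have h1 : monday.foldl pvAStepM PySem.Dict.empty
      = pvTransform (monday.foldl (fun g r => pvAddToGroups g (Sum.inl r)) PySem.Dict.empty) := by
    have h := foldl_transform (monday.map Sum.inl) PySem.Dict.empty
    simpa [List.foldl_map, pvStepA] using h
  have h2 := foldl_transform (q1.map Sum.inr)
      (monday.foldl (fun g r => pvAddToGroups g (Sum.inl r)) PySem.Dict.empty)
  rw [h1]
  have h3 : q1.foldl pvAStepQ (pvTransform (monday.foldl (fun g r => pvAddToGroups g (Sum.inl r)) PySem.Dict.empty))
      = pvTransform (q1.foldl (fun g r => pvAddToGroups g (Sum.inr r)) (monday.foldl (fun g r => pvAddToGroups g (Sum.inl r)) PySem.Dict.empty)) := by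
    simpa [List.foldl_map, pvStepA] using h2
  rw [h3]
  simp [pvTransform, PySem.Dict.values, List.map_map, Function.comp]
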